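-- pv_equiv track=rewrite | github.com/JingboYang/SimpleAudioRecognition | PythonProject/dynamic_time_wrap.py | fill_vectors
-- ===== SOURCE A (Python) =====
-- def fill_vectors(path, v1, v2):
--
--     v1_filled = []
--     v2_filled = []
--     v1_repeated = []
--     v2_repeated = []
--
--     v1_prev = -1
--     v2_prev = -1
--     for p in path:
--         v1_filled.append(v1[p[0] - 1])
--         v2_filled.append(v2[p[1] - 1])
--
--         if p[0] == v1_prev:
--             v1_repeated.append(True)
--         else:
--             v1_repeated.append(False)
--
--         if p[1] == v2_prev:
--             v2_repeated.append(True)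
--         else:
--             v2_repeated.append(False)
--
--         v1_prev = p[0]
--         v2_prev = p[1]
--
--     return v1_filled, v2_filled, v1_repeated, v2_repeated
-- ===== SOURCE B (Python) =====
-- def fill_vectors(path, v1, v2):
--     # Run-length strategy: compress each coordinate stream into runs,
--     # do ONE lookup per run, and derive repeat flags from the run lengths.
--     def run_length(coords):
--         runs = []
--         i, n = 0, len(coords)
--         while i < n:
--             j = i + 1
--             while j < n and coords[j] == coords[i]:
--                 j += 1
--             runs.append((coords[i], j - i))
--             i = j
--         return runs
--
--     def expand(coords, v, prev):
--         filled, flags = [], []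
--         for x, n in run_length(coords):
--             filled += [v[x - 1]] * n
--             flags += [x == prev] + [True] * (n - 1)
--             prev = x
--         return filled, flags
--
--     v1_filled, v1_repeated = expand([p[0] for p in path], v1, -1)
--     v2_filled, v2_repeated = expand([p[1] for p in path], v2, -1)
--     return v1_filled, v2_filled, v1_repeated, v2_repeated
-- ===== Notes on version B (the rewrite author's own statement) =====
-- stated objective: alternative
-- what changed: Replaces A's single stateful element-by-element loop with a run-length-encoding algorithm: each coordinate stream is compressed into (value, count) runs by a two-pointer scan, then one vector lookup is done per run and replicated, and the repeat flags are emitted structurally from the run lengths (first of a run False except the initial -1 sentinel check, the rest True).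
import Mathlib
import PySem

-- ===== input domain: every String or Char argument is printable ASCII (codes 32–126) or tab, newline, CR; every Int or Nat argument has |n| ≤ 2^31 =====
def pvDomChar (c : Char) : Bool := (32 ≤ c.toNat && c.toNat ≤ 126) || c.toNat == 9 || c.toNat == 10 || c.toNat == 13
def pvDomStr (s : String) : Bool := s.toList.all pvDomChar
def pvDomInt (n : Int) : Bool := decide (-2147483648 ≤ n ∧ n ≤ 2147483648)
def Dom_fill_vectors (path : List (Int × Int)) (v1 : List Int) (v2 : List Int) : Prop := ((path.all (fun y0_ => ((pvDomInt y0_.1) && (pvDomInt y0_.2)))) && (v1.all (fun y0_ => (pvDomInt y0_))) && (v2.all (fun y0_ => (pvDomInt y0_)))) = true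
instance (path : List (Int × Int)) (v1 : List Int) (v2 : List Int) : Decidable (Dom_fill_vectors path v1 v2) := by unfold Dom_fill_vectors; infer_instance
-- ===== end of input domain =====

-- B replaces A's stateful per-element loop by run-length encoding of each coordinate stream (one lookup per run, flags from run lengths); same cost, different algorithm.
-- ===== PORT A =====
-- the for-loop of A: recursion over path threading the v1_prev/v2_prev state, building the four lists front-to-back
def fill_vectors_loop (v1 : List Int) (v2 : List Int) (v1_prev : Int) (v2_prev : Int) : List (Int × Int) → List Int × List Int × List Bool × List Bool
  | [] => ([], [], [], [])
  | p :: rest =>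
    let r := fill_vectors_loop v1 v2 p.1 p.2 rest
    ((PySem.List.pyGet? v1 (p.1 - 1)).getD 0 :: r.1,
     (PySem.List.pyGet? v2 (p.2 - 1)).getD 0 :: r.2.1,
     (p.1 == v1_prev) :: r.2.2.1,
     (p.2 == v2_prev) :: r.2.2.2)

def fill_vectors (path : List (Int × Int)) (v1 : List Int) (v2 : List Int) : List Int × List Int × List Bool × List Bool :=
  fill_vectors_loop v1 v2 (-1) (-1) path

-- ===== PORT B =====
-- Source B's run_length two-pointer scan: the inner while advancing j is the leading-equal prefix of the suffix
def pvRunLength : List Int → List (Int × Nat)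
  | [] => []
  | x :: xs =>
    (x, (xs.takeWhile (fun y => y == x)).length + 1) :: pvRunLength (xs.dropWhile (fun y => y == x))
termination_by xs => xs.length
decreasing_by
  simpa using Nat.lt_succ_of_le (List.length_dropWhile_le _ _)

-- Source B's expand loop over the runs, threading prev
def pvExpand (v : List Int) (prev : Int) : List (Int × Nat) → List Int × List Bool
  | [] => ([], [])
  | (x, n) :: rest =>
    let r := pvExpand v x rest
    (List.replicate n ((PySem.List.pyGet? v (x - 1)).getD 0) ++ r.1,
     ((x == prev) :: List.replicate (n - 1) true) ++ r.2)

def fill_vectors_alt (path : List (Int × Int)) (v1 : List Int) (v2 : List Int) : List Int × List Int × List Bool × List Bool :=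
  let h1 := pvExpand v1 (-1) (pvRunLength (path.map (fun p => p.1)))
  let h2 := pvExpand v2 (-1) (pvRunLength (path.map (fun p => p.2)))
  (h1.1, h2.1, h1.2, h2.2)

-- ===== PRECONDITION & SPEC =====
-- Pre_ excludes exactly the inputs where Python A raises IndexError: some path entry indexes v1/v2 out of Python range.
def Pre_fill_vectors (path : List (Int × Int)) (v1 : List Int) (v2 : List Int) : Prop :=
  ∀ p ∈ path, PySem.Raise.InRange v1.length (p.1 - 1) ∧ PySem.Raise.InRange v2.length (p.2 - 1)
instance (path : List (Int × Int)) (v1 : List Int) (v2 : List Int) : Decidable (Pre_fill_vectors path v1 v2) := by unfold Pre_fill_vectors; infer_instance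
def pvWitness_fill_vectors : (List (Int × Int)) × List Int × List Int := ([(1, 1), (2, 1)], [10, 20], [5])

def Spec_fill_vectors (path : List (Int × Int)) (v1 : List Int) (v2 : List Int) (out : List Int × List Int × List Bool × List Bool) : Prop := out = fill_vectors_alt path v1 v2
instance (path : List (Int × Int)) (v1 : List Int) (v2 : List Int) (out : List Int × List Int × List Bool × List Bool) : Decidable (Spec_fill_vectors path v1 v2 out) := by unfold Spec_fill_vectors; infer_instance

-- ===== CLAIM (what is proved, stated in full; the proofs are below) =====
def Claim_equal_fill_vectors : Prop := ∀ (path : List (Int × Int)) (v1 : List Int) (v2 : List Int), Dom_fill_vectors path v1 v2 → Pre_fill_vectors path v1 v2 → Spec_fill_vectors path v1 v2 (fill_vectors path v1 v2)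

-- ===== LEMMAS AND PROOFS =====
-- A's flag stream per coordinate
def aFlags (prev : Int) : List Int → List Bool
  | [] => []
  | x :: xs => (x == prev) :: aFlags x xs

-- A's loop is the per-coordinate maps and flag streams
theorem fill_vectors_loop_split (v1 v2 : List Int) (p1 p2 : Int) (path : List (Int × Int)) :
    fill_vectors_loop v1 v2 p1 p2 path =
      ((path.map (fun p => p.1)).map (fun i => (PySem.List.pyGet? v1 (i - 1)).getD 0),
       (path.map (fun p => p.2)).map (fun j => (PySem.List.pyGet? v2 (j - 1)).getD 0),
       aFlags p1 (path.map (fun p => p.1)),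
       aFlags p2 (path.map (fun p => p.2))) := by
  induction path generalizing p1 p2 with
  | nil => rfl
  | cons p rest ih => simp [fill_vectors_loop, ih p.1 p.2, aFlags]

theorem aFlags_all_eq (x : Int) (t rest : List Int) (h : ∀ y ∈ t, y = x) :
    aFlags x (t ++ rest) = List.replicate t.length true ++ aFlags x rest := by
  induction t with
  | nil => simp
  | cons a s ih =>
      have ha : a = x := h a (by simp)
      simp only [List.cons_append, aFlags, ha, List.length_cons, List.replicate_succ]
      simp [ih (fun y hy => h y (by simp [hy]))]

theorem map_all_eq (x : Int) (t : List Int) (f : Int → Int) (h : ∀ y ∈ t, y = x) :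
    t.map f = List.replicate t.length (f x) := by
  induction t with
  | nil => simp
  | cons a s ih =>
      have ha : a = x := h a (by simp)
      simp [ha, List.replicate_succ, ih (fun y hy => h y (by simp [hy]))]

-- B's expand over the runs equals A's per-coordinate map and flag stream
theorem pvExpand_runLength (v : List Int) (coords : List Int) :
    ∀ prev : Int,
      pvExpand v prev (pvRunLength coords) =
        (coords.map (fun i => (PySem.List.pyGet? v (i - 1)).getD 0), aFlags prev coords) := by
  induction coords using pvRunLength.induct with
  | case1 => intro prev; simp [pvRunLength, pvExpand, List.map, aFlags]
  | case2 x xs ih =>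
      intro prev
      have hsplit : xs.takeWhile (fun y => y == x) ++ xs.dropWhile (fun y => y == x) = xs :=
        List.takeWhile_append_dropWhile
      have hall : ∀ y ∈ xs.takeWhile (fun y => y == x), y = x := by
        intro y hy
        have := List.mem_takeWhile_imp hy
        simpa using this
      simp only [pvRunLength, pvExpand, ih, Prod.mk.injEq]
      refine ⟨?_, ?_⟩
      · simp only [List.map_cons, List.replicate_succ, List.cons_append]
        conv_rhs => rw [← hsplit]
        rw [List.map_append, map_all_eq x _ _ hall]
      · simp only [aFlags, Nat.add_sub_cancel, List.cons_append]
        conv_rhs => rw [← hsplit]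
        rw [aFlags_all_eq x _ _ hall]

-- ===== VERDICT (by name: the statement is the Claim_ definition above) =====
theorem fill_vectors_spec : Claim_equal_fill_vectors := by
  intro path v1 v2 _ _
  unfold Spec_fill_vectors fill_vectors fill_vectors_alt
  rw [fill_vectors_loop_split, pvExpand_runLength, pvExpand_runLength]
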